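-- pv_equiv track=rewrite | github.com/grwna/cryptosystem-complexity-analysis | src/aes.py | plaintext_to_blocks
-- ===== SOURCE A (Python) =====
-- def plaintext_to_blocks(plaintext):
--     blocks = []
--     while plaintext:
--         block = plaintext[:16]
--         if len(block) < 16:
--             block += '\x00' * (16 - len(block))
--         blocks.append([[ord(block[i + j * 4]) for i in range(4)] for j in range(4)])  # Convert to 4x4 matrix
--         plaintext = plaintext[16:]
--     return blocks
-- ===== SOURCE B (Python) =====
-- def plaintext_to_blocks(plaintext):
--     codes = [ord(c) for c in plaintext]
--     codes = codes + [0] * (-len(codes) % 16)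
--     rows = [codes[r:r + 4] for r in range(0, len(codes), 4)]
--     return [rows[b:b + 4] for b in range(0, len(rows), 4)]
-- ===== Notes on version B (the rewrite author's own statement) =====
-- stated objective: simpler
-- what changed: B maps the whole plaintext to a flat list of code points once, pads it with zeros to a multiple of 16 up front, and then groups it twice (rows of 4, blocks of 4 rows), instead of A's while-loop that repeatedly re-slices the string tail and pads each short block inside the loop; avoiding the per-iteration string re-slicing also makes B measurably faster.
import Mathlib
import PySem

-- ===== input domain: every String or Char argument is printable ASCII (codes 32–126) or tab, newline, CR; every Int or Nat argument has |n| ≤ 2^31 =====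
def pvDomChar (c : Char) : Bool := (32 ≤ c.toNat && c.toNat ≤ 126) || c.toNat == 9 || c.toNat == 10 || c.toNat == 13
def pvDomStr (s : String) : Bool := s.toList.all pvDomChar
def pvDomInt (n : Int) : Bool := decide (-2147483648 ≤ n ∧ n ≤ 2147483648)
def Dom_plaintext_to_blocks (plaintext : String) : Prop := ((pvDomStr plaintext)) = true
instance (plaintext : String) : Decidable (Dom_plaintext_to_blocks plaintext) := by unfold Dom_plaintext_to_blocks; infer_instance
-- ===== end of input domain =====

-- B flattens the text to code points once, pads that flat list to a multiple of 16,
-- and groups it twice (rows of 4, then blocks of 4 rows) instead of A's while-loop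
-- that re-slices the string tail and pads each short block inside the loop (objective: simpler).

-- ===== PORT A =====
-- 'block += "\x00" * (16 - len(block))'
def pvPad (block : List Char) : List Char :=
  if block.length < 16 then block ++ List.replicate (16 - block.length) (Char.ofNat 0) else block

-- '[[ord(block[i + j * 4]) for i in range(4)] for j in range(4)]'
def pvBlockMat (block : List Char) : List (List Int) :=
  (PySem.List.pyRange 0 4 1).map (fun j =>
    (PySem.List.pyRange 0 4 1).map (fun i =>
      ((PySem.List.pyGetD block (i + j * 4) (Char.ofNat 0)).toNat : Int)))

def pvALoop (cs : List Char) : List (List (List Int)) :=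
  if h : cs = [] then []
  else
    pvBlockMat (pvPad (PySem.List.slice cs none (some 16)))
      :: pvALoop (PySem.List.slice cs (some 16) none)
termination_by cs.length
decreasing_by
  rw [PySem.List.slice_from cs (by norm_num : (0:Int) ≤ 16)]
  have : cs.length ≠ 0 := by simpa [List.length_eq_zero_iff] using h
  simp; omega

def plaintext_to_blocks (plaintext : String) : List (List (List Int)) :=
  pvALoop plaintext.toList

-- ===== PORT B =====
def plaintext_to_blocks_alt (plaintext : String) : List (List (List Int)) :=
  let codes := plaintext.toList.map (fun c => (c.toNat : Int))
  let codes := codes ++ List.replicate (PySem.Int.mod (-(codes.length : Int)) 16).toNat (0 : Int)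
  let rows := (PySem.List.pyRange 0 (codes.length : Int) 4).map
      (fun r => PySem.List.slice codes (some r) (some (r + 4)))
  (PySem.List.pyRange 0 (rows.length : Int) 4).map
      (fun b => PySem.List.slice rows (some b) (some (b + 4)))

-- ===== PRECONDITION & SPEC =====
def Spec_plaintext_to_blocks (plaintext : String) (out : List (List (List Int))) : Prop := out = plaintext_to_blocks_alt plaintext
instance (plaintext : String) (out : List (List (List Int))) : Decidable (Spec_plaintext_to_blocks plaintext out) := by unfold Spec_plaintext_to_blocks; infer_instance

-- ===== CLAIM (what is proved, stated in full; the proofs are below) =====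
def Claim_equal_plaintext_to_blocks : Prop := ∀ (plaintext : String), Dom_plaintext_to_blocks plaintext → Spec_plaintext_to_blocks plaintext (plaintext_to_blocks plaintext)

-- ===== LEMMAS AND PROOFS =====

/-- Consecutive groups of four (last group may be short). -/
def pvChunks4 {α : Type} : List α → List (List α)
  | [] => []
  | a :: b :: c :: d :: t => [a, b, c, d] :: pvChunks4 t
  | l => [l]

/-- The flat code-point list B pads to, written with plain Nat arithmetic. -/
def padCodes (cs : List Char) : List Int :=
  cs.map (fun c => (c.toNat : Int)) ++ List.replicate ((16 - cs.length % 16) % 16) (0 : Int)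

theorem length_pvChunks4 {α : Type} (l : List α) :
    (pvChunks4 l).length = (l.length + 3) / 4 := by
  induction l using pvChunks4.induct with
  | case1 => simp [pvChunks4]
  | case2 a b c d t ih => simp [pvChunks4, ih]; omega
  | case3 l h1 h2 =>
      rcases l with _ | ⟨a, _ | ⟨b, _ | ⟨c, _ | ⟨d, t⟩⟩⟩⟩
      · exact absurd rfl h1
      · simp [pvChunks4]
      · simp [pvChunks4]
      · simp [pvChunks4]
      · exact (h2 a b c d t rfl).elim

theorem pvChunks4_append {α : Type} (l r : List α) (h : l.length % 4 = 0) :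
    pvChunks4 (l ++ r) = pvChunks4 l ++ pvChunks4 r := by
  induction l using pvChunks4.induct with
  | case1 => simp [pvChunks4]
  | case2 a b c d t ih =>
      have ht : t.length % 4 = 0 := by simp at h; omega
      simp [pvChunks4, ih ht]
  | case3 l h1 h2 =>
      rcases l with _ | ⟨a, _ | ⟨b, _ | ⟨c, _ | ⟨d, t⟩⟩⟩⟩
      · exact absurd rfl h1
      · simp at h
      · simp at h
      · simp at h
      · exact (h2 a b c d t rfl).elim

theorem pvChunks4_of_len4 {α : Type} (l : List α) (h : l.length = 4) :
    pvChunks4 l = [l] := by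
  rcases l with _ | ⟨a, _ | ⟨b, _ | ⟨c, _ | ⟨d, _ | ⟨e, t⟩⟩⟩⟩⟩ <;> simp_all [pvChunks4]

theorem chunks_take_drop {α : Type} (L : List α) :
    (List.range ((L.length + 3) / 4)).map (fun k => (L.drop (4 * k)).take 4) = pvChunks4 L := by
  induction L using pvChunks4.induct with
  | case1 => simp [pvChunks4]
  | case2 a b c d t ih =>
      have hm : ((a :: b :: c :: d :: t).length + 3) / 4 = (t.length + 3) / 4 + 1 := by
        simp; omega
      rw [hm, List.range_succ_eq_map, List.map_cons, List.map_map]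
      simp only [pvChunks4]
      refine congrArg₂ List.cons (by simp) ?_
      rw [← ih]
      apply List.map_congr_left
      intro k _
      have h4 : 4 * Nat.succ k = 4 + 4 * k := by omega
      simp only [Function.comp_apply, h4, ← List.drop_drop]
      rfl
  | case3 l h1 h2 =>
      rcases l with _ | ⟨a, _ | ⟨b, _ | ⟨c, _ | ⟨d, t⟩⟩⟩⟩
      · exact absurd rfl h1
      · simp [pvChunks4, List.range_succ]
      · simp [pvChunks4, List.range_succ]
      · simp [pvChunks4, List.range_succ]
      · exact (h2 a b c d t rfl).elim

theorem range_slice_chunks {α : Type} (L : List α) :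
    (PySem.List.pyRange 0 (L.length : Int) 4).map
      (fun r => PySem.List.slice L (some r) (some (r + 4))) = pvChunks4 L := by
  rw [PySem.List.pyRange_of_pos _ _ (by norm_num : (0:Int) < 4)]
  have hc : (if (0:Int) < (L.length : Int) then (((L.length : Int) - 0 + 4 - 1) / 4).toNat else 0)
      = (L.length + 3) / 4 := by
    split_ifs with h <;> omega
  rw [hc, List.map_map, ← chunks_take_drop]
  apply List.map_congr_left
  intro k _
  have h1 : (0 : Int) ≤ 0 + 4 * (k : Int) := by positivity
  have h2 : (0 : Int) ≤ 0 + 4 * (k : Int) + 4 := by positivity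
  simp only [Function.comp_apply]
  rw [PySem.List.slice_toNat L h1 h2]
  have e1 : ((0:Int) + 4 * (k:Int)).toNat = 4 * k := by omega
  have e2 : ((0:Int) + 4 * (k:Int) + 4).toNat - ((0:Int) + 4 * (k:Int)).toNat = 4 := by omega
  rw [e2, e1]

theorem padCodes_amount (n : Nat) :
    (PySem.Int.mod (-(n : Int)) 16).toNat = (16 - n % 16) % 16 := by
  have h : PySem.Int.mod (-(n : Int)) 16 = (-(n : Int)) % 16 := by
    rw [PySem.Int.mod, Int.fmod_eq_emod]; simp
  rw [h]; omega

theorem alt_eq (s : String) :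
    plaintext_to_blocks_alt s = pvChunks4 (pvChunks4 (padCodes s.toList)) := by
  unfold plaintext_to_blocks_alt
  simp only
  rw [show (s.toList.map (fun c => (c.toNat : Int))).length = s.toList.length by simp,
      padCodes_amount, range_slice_chunks, range_slice_chunks]
  rfl

/-- The 4×4 index-comprehension on a 16-char block is exactly chunking its code points by 4. -/
theorem block_matrix (b : List Char) (h : b.length = 16) :
    pvBlockMat b = pvChunks4 (b.map (fun c => (c.toNat : Int))) := by
  rcases b with _ | ⟨c0, _ | ⟨c1, _ | ⟨c2, _ | ⟨c3, _ | ⟨c4, _ | ⟨c5, _ | ⟨c6, _ | ⟨c7, _ | ⟨c8, _ | ⟨c9, _ | ⟨c10, _ | ⟨c11, _ | ⟨c12, _ | ⟨c13, _ | ⟨c14, _ | ⟨c15, _ | ⟨c16, t⟩⟩⟩⟩⟩⟩⟩⟩⟩⟩⟩⟩⟩⟩⟩⟩⟩ <;>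
    first
      | rfl
      | simp at h

theorem padCodes_split (cs : List Char) (h : 16 ≤ cs.length) :
    padCodes cs = (cs.take 16).map (fun c => (c.toNat : Int)) ++ padCodes (cs.drop 16) := by
  unfold padCodes
  conv_rhs => rw [← List.append_assoc, ← List.map_append, List.take_append_drop]
  congr 2
  simp; omega

theorem padCodes_short (cs : List Char) (h1 : cs ≠ []) (h2 : cs.length < 16) :
    (cs ++ List.replicate (16 - cs.length) (Char.ofNat 0)).map (fun c => (c.toNat : Int))
      = padCodes cs := by
  unfold padCodes
  rw [List.map_append, List.map_replicate]
  have h0 : cs.length ≠ 0 := by simpa [List.length_eq_zero_iff] using h1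
  have he : (16 - cs.length % 16) % 16 = 16 - cs.length := by omega
  simp [he]

theorem aLoop_eq : ∀ (n : Nat) (cs : List Char), cs.length ≤ n →
    pvALoop cs = pvChunks4 (pvChunks4 (padCodes cs)) := by
  intro n
  induction n with
  | zero =>
      intro cs h
      have : cs = [] := List.eq_nil_of_length_eq_zero (by omega)
      subst this
      rw [pvALoop.eq_def]
      simp [padCodes, pvChunks4]
  | succ n ih =>
      intro cs hle
      by_cases hnil : cs = []
      · subst hnil
        rw [pvALoop.eq_def]
        simp [padCodes, pvChunks4]
      · rw [pvALoop.eq_def, dif_neg hnil,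
            PySem.List.slice_to cs (by norm_num : (0:Int) ≤ 16),
            PySem.List.slice_from cs (by norm_num : (0:Int) ≤ 16)]
        have h16 : ((16:Int)).toNat = 16 := rfl
        rw [h16]
        have hpos : 0 < cs.length := List.length_pos_iff.mpr hnil
        by_cases hbig : 16 ≤ cs.length
        · have hlen : (cs.take 16).length = 16 := by simp; omega
          have hnotlt : ¬ (cs.take 16).length < 16 := by omega
          rw [pvPad, if_neg hnotlt]
          rw [block_matrix _ hlen]
          rw [ih (cs.drop 16) (by simp; omega)]
          rw [padCodes_split cs hbig]
          have hA : ((cs.take 16).map (fun c => (c.toNat : Int))).length % 4 = 0 := by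
            rw [List.length_map, hlen]
          have hA4 : (pvChunks4 ((cs.take 16).map (fun c => (c.toNat : Int)))).length % 4 = 0 := by
            rw [length_pvChunks4, List.length_map, hlen]
          rw [pvChunks4_append _ _ hA, pvChunks4_append _ _ hA4,
              pvChunks4_of_len4 (pvChunks4 ((cs.take 16).map (fun c => (c.toNat : Int)))) (by rw [length_pvChunks4, List.length_map, hlen])]
          rfl
        · have htake : cs.take 16 = cs := List.take_of_length_le (by omega)
          rw [htake]
          have hlt : cs.length < 16 := by omega
          rw [pvPad, if_pos hlt]
          have hdrop : cs.drop 16 = [] := List.drop_eq_nil_of_le (by omega)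
          rw [hdrop, pvALoop.eq_def]
          simp only [dite_true]
          have hblen : (cs ++ List.replicate (16 - cs.length) (Char.ofNat 0)).length = 16 := by
            simp; omega
          rw [block_matrix _ hblen, padCodes_short cs hnil hlt]
          have hp16 : (padCodes cs).length = 16 := by
            rw [← padCodes_short cs hnil hlt]; simp; omega
          rw [pvChunks4_of_len4 (pvChunks4 (padCodes cs))
                (by rw [length_pvChunks4, hp16])]

-- ===== VERDICT (by name: the statement is the Claim_ definition above) =====
theorem plaintext_to_blocks_spec : Claim_equal_plaintext_to_blocks := by
  intro s _
  unfold Spec_plaintext_to_blocks plaintext_to_blocks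
  rw [alt_eq, aLoop_eq s.toList.length s.toList le_rfl]
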